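-- pv_equiv track=rewrite | github.com/ky8778/study_algorithm | KAKAO/2021 KAKAO BLIND RECRUITMENT/신규아이디추천.py | solution
-- ===== SOURCE A (Python) =====
-- def solution(new_id):
--     answer = ''
--     # step1
--     new_id = new_id.lower()
--
--     # step 2
--     tmp = ''
--     for c in new_id:
--         if c.isalpha() or c.isdigit() or c == '-' or c=='_' or c == '.':
--             tmp += c
--
--     # step 3
--     prev = ''
--     for c in tmp:
--         if c == '.':
--             if prev != '.':
--                 answer += c
--         else:
--             answer += c
--         prev = c
--
--     # step 4
--     if len(answer) > 0 and answer[0] == '.':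
--         answer = answer[1:]
--     if len(answer) > 0 and answer[-1] == '.':
--         answer = answer[:-1]
--
--     # step 5
--     if len(answer) <= 0:
--         answer = 'a'
--
--     # step 6
--     if len(answer) >= 16:
--         answer = answer[:15]
--         if answer[-1] == '.':
--             answer = answer[:-1]
--
--     # step 7
--     while len(answer) <= 2:
--         answer += answer[-1]
--
--     return answer
-- ===== SOURCE B (Python) =====
-- def solution(new_id):
--     # Single fused left-to-right pass with an early break: filtering, dot-collapsing,
--     # leading-dot stripping and the 15-char truncation all happen inside one loop.
--     out = []
--     for c in new_id:
--         if len(out) == 15: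
--             break
--         c = c.lower()
--         if ('a' <= c <= 'z' or '0' <= c <= '9' or c == '-' or c == '_'
--                 or (c == '.' and out and out[-1] != '.')):
--             out.append(c)
--     if out and out[-1] == '.':
--         out.pop()
--     s = ''.join(out) or 'a'
--     return s + s[-1] * (3 - len(s))
-- ===== Notes on version B (the rewrite author's own statement) =====
-- stated objective: faster
-- what changed: A runs five separate staged passes (lowercase+filter loop, prev-state dot-collapsing loop, leading/trailing dot strips, truncate-then-strip, pad loop); B is a single fused left-to-right scan that does filtering, dot-collapsing, leading-dot stripping and the 15-char truncation in one loop and breaks out as soon as 15 characters are kept, followed only by one trailing-dot pop, a default and arithmetic padding.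
import Mathlib
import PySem

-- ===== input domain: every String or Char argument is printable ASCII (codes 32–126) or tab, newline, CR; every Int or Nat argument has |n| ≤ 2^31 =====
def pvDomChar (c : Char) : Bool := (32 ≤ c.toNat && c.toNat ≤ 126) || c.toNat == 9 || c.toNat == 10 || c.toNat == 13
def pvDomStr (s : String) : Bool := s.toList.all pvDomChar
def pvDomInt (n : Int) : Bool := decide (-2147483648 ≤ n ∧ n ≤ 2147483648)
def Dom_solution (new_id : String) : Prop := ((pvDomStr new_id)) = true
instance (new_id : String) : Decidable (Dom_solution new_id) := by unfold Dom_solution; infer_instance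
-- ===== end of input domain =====

-- B fuses A's five staged passes (filter, dot-collapse, strip, truncate) into one
-- left-to-right pass with an early break at 15 kept characters (measured faster on long inputs); return value only.

-- ===== PORT A =====
-- step-2 filter condition of A, verbatim
def keepCharA (c : Char) : Bool :=
  PySem.Chars.isalpha c || PySem.Chars.isdigit c || c == '-' || c == '_' || c == '.'

-- A's step-7 'while len(answer) <= 2: answer += answer[-1]' (answer is never empty there;
-- the [] branch is Python's IndexError, unreachable from solution)
def padA (l : List Char) : List Char :=
  if l = [] then []   -- Python's answer[-1] raises IndexError here; unreachable from solution
  else if l.length ≤ 2 then padA (l ++ [l.getLastD 'a'])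
  else l
termination_by 3 - l.length
decreasing_by
  rename_i hne _
  have : 0 < l.length := List.length_pos_iff.mpr hne
  simp only [List.length_append, List.length_cons, List.length_nil]
  omega

def solution (new_id : String) : String :=
  -- step 1
  let lowered := PySem.Chars.lower new_id.toList
  -- step 2
  let tmp := lowered.foldl (fun acc c => if keepCharA c then acc ++ [c] else acc) ([] : List Char)
  -- step 3: state = (answer, prev); prev starts as the empty string
  let st := tmp.foldl (fun (st : List Char × List Char) c =>
      ((if c = '.' then (if st.2 ≠ ['.'] then st.1 ++ [c] else st.1) else st.1 ++ [c]), [c]))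
      (([] : List Char), ([] : List Char))
  let ans0 := st.1
  -- step 4
  let ans1 := if 0 < ans0.length ∧ PySem.List.pyGet? ans0 0 = some '.' then
                PySem.List.slice ans0 (some 1) none else ans0
  let ans2 := if 0 < ans1.length ∧ PySem.List.pyGet? ans1 (-1) = some '.' then
                PySem.List.slice ans1 none (some (-1)) else ans1
  -- step 5
  let ans3 := if ans2.length ≤ 0 then ['a'] else ans2
  -- step 6
  let ans4 := if 16 ≤ ans3.length then
      (let t := PySem.List.slice ans3 none (some 15)
       if PySem.List.pyGet? t (-1) = some '.' then PySem.List.slice t none (some (-1)) else t)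
    else ans3
  -- step 7
  String.ofList (padA ans4)

-- ===== PORT B =====
-- Source B's per-char test `'a' <= c <= 'z' or '0' <= c <= '9' or c == '-' or c == '_'`
def bPlain (c : Char) : Bool :=
  PySem.Chars.islower c || PySem.Chars.isdigit c || c == '-' || c == '_'

-- Source B's `out and out[-1] != '.'` read off the current accumulator
def bDotOK (last? : Option Char) : Bool :=
  match last? with
  | some l => l != '.'
  | none => false

-- Source B's single for-loop with its `if len(out) == 15: break`
def bLoop (out : List Char) : List Char → List Char
  | [] => out
  | c :: r =>
      if out.length == 15 then out   -- break
      else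
        let c' := PySem.Chars.lowerChar c
        if bPlain c' || (c' == '.' && bDotOK out.getLast?) then bLoop (out ++ [c']) r
        else bLoop out r

def solution_alt (new_id : String) : String :=
  let out := bLoop [] new_id.toList
  let out2 := if out ≠ [] ∧ out.getLast? = some '.' then out.dropLast else out   -- out.pop()
  let s := if out2 = [] then ['a'] else out2                                      -- `or 'a'`
  String.ofList (s ++ List.replicate (3 - s.length) (s.getLastD 'a'))                 -- s + s[-1]*(3-len(s))

-- ===== PRECONDITION & SPEC =====
def Spec_solution (new_id : String) (out : String) : Prop := out = solution_alt new_id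
instance (new_id : String) (out : String) : Decidable (Spec_solution new_id out) := by unfold Spec_solution; infer_instance

-- ===== CLAIM =====
def Claim_equal_solution : Prop := ∀ (new_id : String), Dom_solution new_id → Spec_solution new_id (solution new_id)

-- ===== LEMMAS AND PROOFS =====

theorem char_le_toNat (a b : Char) : a ≤ b ↔ a.toNat ≤ b.toNat := by
  rw [Char.le_def, Char.toNat, Char.toNat, UInt32.le_iff_toNat_le]

theorem isupper_lowerChar (c : Char) : PySem.Chars.isupper (PySem.Chars.lowerChar c) = false := by
  unfold PySem.Chars.lowerChar
  by_cases h : PySem.Chars.isupper c = true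
  · simp only [h, if_true]
    simp only [PySem.Chars.isupper, Bool.and_eq_true, decide_eq_true_eq, char_le_toNat] at h
    have hA : ('A' : Char).toNat = 65 := by decide
    have hZ : ('Z' : Char).toNat = 90 := by decide
    rw [hA, hZ] at h
    have hv : (c.toNat + 32).isValidChar := by left; omega
    have ht : (Char.ofNat (c.toNat + 32)).toNat = c.toNat + 32 := by
      rw [Char.toNat_ofNat]; simp [hv]
    simp only [PySem.Chars.isupper, Bool.and_eq_false_iff, decide_eq_false_iff_not,
      char_le_toNat, ht, hZ]
    right; omega
  · simp only [h]
    simpa using h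

-- on a lowercased character, A's step-2 test is B's plain test plus the dot
theorem keepA_lowered (c : Char) :
    keepCharA (PySem.Chars.lowerChar c)
      = (bPlain (PySem.Chars.lowerChar c) || (PySem.Chars.lowerChar c == '.')) := by
  simp only [keepCharA, bPlain, PySem.Chars.isalpha, isupper_lowerChar, Bool.false_or]

-- A, step 2: the append loop is a filter
theorem stepTwo (l acc : List Char) :
    l.foldl (fun acc c => if keepCharA c then acc ++ [c] else acc) acc
      = acc ++ l.filter keepCharA :=
  PySem.List.foldl_append_if_eq_filter keepCharA l acc

-- A, step 3 as a recursion on (prev, rest)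
def go (prev : List Char) : List Char → List Char
  | [] => []
  | c :: r => (if c = '.' then (if prev ≠ ['.'] then [c] else []) else [c]) ++ go [c] r

theorem stepThree_foldl (l : List Char) (ans prev : List Char) :
    (l.foldl (fun (st : List Char × List Char) c =>
      ((if c = '.' then (if st.2 ≠ ['.'] then st.1 ++ [c] else st.1) else st.1 ++ [c]), [c]))
      (ans, prev)).1 = ans ++ go prev l := by
  induction l generalizing ans prev with
  | nil => simp [go]
  | cons c r ih =>
    simp only [List.foldl_cons, go]
    rw [ih]
    by_cases hc : c = '.'
    · by_cases hp : prev = ['.'] <;> simp [hc, hp]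
    · simp [hc]

-- canonical form of a dot-collapsed list (proof-side only; neither port computes it)
def collapseDots : List Char → List Char
  | [] => []
  | c :: rest =>
      if c = '.' then '.' :: collapseDots (rest.dropWhile (· = '.'))
      else c :: collapseDots rest
termination_by l => l.length
decreasing_by
  · have := List.length_dropWhile_le (· = '.') rest; simp; omega
  · simp

theorem go_eq_collapse (l : List Char) (prev : List Char) :
    go prev l = if prev = ['.'] then collapseDots (l.dropWhile (· = '.')) else collapseDots l := by
  induction l generalizing prev with
  | nil => simp [go, collapseDots]
  | cons c r ih =>
    by_cases hc : c = '.'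
    · subst hc
      by_cases hp : prev = ['.']
      · simp [go, hp, ih]
      · simp [go, hp, ih, collapseDots]
    · simp [go, hc, ih, collapseDots]

theorem collapse_head (m : List Char) (h : m.head? ≠ some '.') :
    (collapseDots m).head? ≠ some '.' := by
  cases m with
  | nil => simp [collapseDots]
  | cons c r =>
    have hc : ¬ (c = '.') := by intro he; exact h (by simp [he])
    simp [collapseDots, hc]

-- no two adjacent dots
def ND (l : List Char) : Prop := l.IsChain (fun a b => ¬ (a = '.' ∧ b = '.'))

theorem nd_collapse (m : List Char) : ND (collapseDots m) := by
  induction m using collapseDots.induct with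
  | case1 => simp [collapseDots, ND]
  | case2 rest ih =>
    have hcc : collapseDots ('.' :: rest) = '.' :: collapseDots (rest.dropWhile (· = '.')) := by
      rw [collapseDots]; simp
    rw [hcc]
    cases hd : collapseDots (rest.dropWhile (· = '.')) with
    | nil => exact List.isChain_singleton _
    | cons b t =>
      rw [ND, List.isChain_cons_cons]
      refine ⟨?_, by rw [← hd]; exact ih⟩
      have hh : (rest.dropWhile (· = '.')).head? ≠ some '.' := by
        cases he : (rest.dropWhile (· = '.')).head? with
        | none => simp
        | some x =>
          have := List.head?_dropWhile_not (· = '.') rest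
          rw [he] at this
          simp only [decide_eq_false_iff_not] at this
          simp only [ne_eq, Option.some.injEq]
          intro hx; exact this (hx ▸ rfl)
      have := collapse_head _ hh
      rw [hd] at this
      simp only [List.head?_cons, ne_eq, Option.some.injEq] at this
      intro hb; exact this hb.2
  | case3 c rest hc ih =>
    have hcc : collapseDots (c :: rest) = c :: collapseDots rest := by
      rw [collapseDots]; simp [hc]
    rw [hcc]
    cases hd : collapseDots rest with
    | nil => exact List.isChain_singleton _
    | cons b t =>
      rw [ND, List.isChain_cons_cons]
      exact ⟨fun hp => hc hp.1, by rw [← hd]; exact ih⟩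

-- if an ND list ends with a dot, the element before it is not a dot
theorem nd_droplast_last {u : List Char} (h : ND u) (hd : u.getLast? = some '.') :
    u.dropLast.getLast? ≠ some '.' := by
  have hrev : ND u.reverse := by
    rw [ND, List.isChain_reverse]
    exact h.imp fun a b hab hp => hab ⟨hp.2, hp.1⟩
  cases hr : u.reverse with
  | nil =>
    have : u = [] := by
      have := congrArg List.reverse hr; simpa using this
    rw [this] at hd; simp at hd
  | cons c t =>
    have hc : c = '.' := by
      rw [← List.head?_reverse, hr] at hd; simpa using hd
    rw [← List.reverse_reverse u, hr]
    cases t with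
    | nil => simp
    | cons b t' =>
      rw [hr, hc] at hrev
      rw [ND, List.isChain_cons_cons] at hrev
      have hb : ¬ (b = '.') := fun hbe => hrev.1 ⟨rfl, hbe⟩
      simp only [List.dropLast_reverse, List.getLast?_reverse]
      simpa using hb

-- the 15-capped loop of B is `take 15` of the uncapped emission
def emit (last? : Option Char) : List Char → List Char
  | [] => []
  | c :: r =>
      let c' := PySem.Chars.lowerChar c
      if bPlain c' || (c' == '.' && bDotOK last?) then c' :: emit (some c') r
      else emit last? r

theorem bLoop_eq_take (l : List Char) (acc : List Char) (hle : acc.length ≤ 15) :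
    bLoop acc l = (acc ++ emit acc.getLast? l).take 15 := by
  induction l generalizing acc with
  | nil =>
    simp [bLoop, emit, List.take_of_length_le hle]
  | cons c r ih =>
    by_cases h15 : acc.length = 15
    · simp only [bLoop, h15, beq_self_eq_true, if_true]
      rw [List.take_append_of_le_length (by omega), List.take_of_length_le (by omega)]
    · have hlt : acc.length < 15 := lt_of_le_of_ne hle h15
      simp only [bLoop, emit]
      rw [if_neg (by simpa using h15)]
      by_cases hc : (bPlain (PySem.Chars.lowerChar c)
          || (PySem.Chars.lowerChar c == '.' && bDotOK acc.getLast?)) = true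
      · rw [if_pos hc, if_pos hc, ih _ (by simp; omega)]
        simp
      · rw [if_neg hc, if_neg hc, ih _ hle]

-- the uncapped emission is A's collapsed-and-lead-stripped filtered string
theorem emit_eq (l : List Char) (last? : Option Char) :
    emit last? l
      = if bDotOK last? = true
        then collapseDots ((PySem.Chars.lower l).filter keepCharA)
        else collapseDots (((PySem.Chars.lower l).filter keepCharA).dropWhile (· = '.')) := by
  induction l generalizing last? with
  | nil => simp [emit, PySem.Chars.lower, collapseDots]
  | cons c r ih =>
    have hl : PySem.Chars.lower (c :: r) = PySem.Chars.lowerChar c :: PySem.Chars.lower r := rfl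
    rw [hl]
    by_cases hk : keepCharA (PySem.Chars.lowerChar c) = true
    · by_cases hdot : PySem.Chars.lowerChar c = '.'
      · -- the kept char is a dot
        have hk' : keepCharA '.' = true := by decide
        have hbp' : bPlain '.' = false := by decide
        simp only [emit, hdot]
        rw [List.filter_cons_of_pos hk']
        cases hOKb : bDotOK last? with
        | true =>
          simp only [hbp', hOKb, Bool.false_or, beq_self_eq_true, Bool.true_and]
          rw [if_pos True.intro, if_pos True.intro, ih,
            if_neg (show ¬ bDotOK (some '.') = true by decide)]
          rw [show collapseDots ('.' :: (PySem.Chars.lower r).filter keepCharA)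
              = '.' :: collapseDots (((PySem.Chars.lower r).filter keepCharA).dropWhile (· = '.'))
            from by rw [collapseDots]; simp]
        | false =>
          simp only [hbp', hOKb, Bool.false_or, beq_self_eq_true, Bool.true_and]
          rw [if_neg (by simp), if_neg (by simp), ih, if_neg (by rw [hOKb]; simp)]
          rw [List.dropWhile_cons_of_pos (by simp)]
      · -- the kept char is not a dot
        have hbp : bPlain (PySem.Chars.lowerChar c) = true := by
          have := keepA_lowered c
          rw [hk] at this
          cases hb : bPlain (PySem.Chars.lowerChar c)
          · rw [hb] at this; simp at this; exact absurd this hdot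
          · rfl
        simp only [emit, hbp, Bool.true_or, if_true, ih]
        rw [List.filter_cons_of_pos hk]
        have hcoll : collapseDots (PySem.Chars.lowerChar c :: (PySem.Chars.lower r).filter keepCharA)
            = PySem.Chars.lowerChar c :: collapseDots ((PySem.Chars.lower r).filter keepCharA) := by
          rw [collapseDots]; simp [hdot]
        have hnd : (PySem.Chars.lowerChar c :: (PySem.Chars.lower r).filter keepCharA).dropWhile (· = '.')
            = PySem.Chars.lowerChar c :: (PySem.Chars.lower r).filter keepCharA := by
          rw [List.dropWhile_cons_of_neg (by simpa using hdot)]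
        have hlast : bDotOK (some (PySem.Chars.lowerChar c)) = true := by
          simp [bDotOK]; simpa using hdot
        rw [if_pos hlast]
        split
        · rw [hcoll]
        · rw [hnd, hcoll]
    · -- char filtered out on both sides
      have hbp : bPlain (PySem.Chars.lowerChar c) = false := by
        have := keepA_lowered c
        cases hb : bPlain (PySem.Chars.lowerChar c)
        · rfl
        · rw [hb] at this; simp at this; rw [this] at hk; simp at hk
      have hdot : (PySem.Chars.lowerChar c == '.') = false := by
        have := keepA_lowered c
        cases hb : (PySem.Chars.lowerChar c == '.')
        · rfl
        · rw [hb, hbp] at this; simp at this; rw [this] at hk; simp at hk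
      simp only [emit, hbp, hdot, Bool.false_and, Bool.or_false, if_neg (by simp : ¬ false = true)]
      rw [ih, List.filter_cons_of_neg (by simp [hk])]

-- first-char strip of a collapsed list is collapsing the lead-stripped list
theorem tail_collapse (m : List Char) :
    (if (collapseDots m).head? = some '.' then (collapseDots m).tail else collapseDots m)
      = collapseDots (m.dropWhile (· = '.')) := by
  cases m with
  | nil => simp [collapseDots]
  | cons c t =>
    by_cases hc : c = '.'
    · subst hc
      rw [collapseDots]
      simp
    · have h1 : collapseDots (c :: t) = c :: collapseDots t := by rw [collapseDots]; simp [hc]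
      rw [h1, List.dropWhile_cons_of_neg (by simpa using hc), h1]
      simp [hc]

-- s.rstrip('.'), used only to restate A's step 6 (proof side)
def rstripDots (l : List Char) : List Char :=
  (l.reverse.dropWhile (· = '.')).reverse

theorem nd_reverse {l : List Char} (h : ND l) : ND l.reverse := by
  rw [ND, List.isChain_reverse]
  exact h.imp fun a b hab hp => hab ⟨hp.2, hp.1⟩

theorem nd_dropWhile {l : List Char} (h : ND l) :
    l.dropWhile (· = '.') = if l.head? = some '.' then l.tail else l := by
  cases l with
  | nil => simp
  | cons c r =>
    by_cases hc : c = '.'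
    · subst hc
      simp only [List.dropWhile_cons, decide_true, List.head?_cons, List.tail_cons]
      cases r with
      | nil => simp
      | cons b t =>
        have hb : ¬ (b = '.') := by
          rw [ND, List.isChain_cons_cons] at h
          exact fun hbe => h.1 ⟨rfl, hbe⟩
        simp [hb]
    · simp [hc]

theorem rstrip_eq {l : List Char} (h : ND l) :
    rstripDots l = if l.getLast? = some '.' then l.dropLast else l := by
  unfold rstripDots
  rw [nd_dropWhile (nd_reverse h), List.head?_reverse]
  by_cases hg : l.getLast? = some '.'
  · rw [if_pos hg, if_pos hg, List.tail_reverse, List.reverse_reverse]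
  · rw [if_neg hg, if_neg hg, List.reverse_reverse]

-- step 7: the while loop pads with the last character up to length 3
theorem pad_eq (l : List Char) (hne : l ≠ []) :
    padA l = l ++ List.replicate (3 - l.length) (l.getLastD 'a') := by
  match l with
  | [a] =>
    rw [padA.eq_def]; simp
    rw [padA.eq_def]; simp
    rw [padA.eq_def]; simp
  | [a, b] =>
    rw [padA.eq_def]; simp
    rw [padA.eq_def]; simp
  | a :: b :: c :: r =>
    rw [padA.eq_def]
    have : (a :: b :: c :: r).length = r.length + 3 := by simp
    simp [this]

theorem stepFourA (x : List Char) :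
    (if 0 < x.length ∧ PySem.List.pyGet? x 0 = some '.' then PySem.List.slice x (some 1) none else x)
      = if x.head? = some '.' then x.tail else x := by
  rw [PySem.List.pyGet?_zero, PySem.List.slice_from_one]
  refine if_congr ?_ rfl rfl
  cases x <;> simp

theorem stepFourB (x : List Char) :
    (if 0 < x.length ∧ PySem.List.pyGet? x (-1) = some '.' then PySem.List.slice x none (some (-1)) else x)
      = if x.getLast? = some '.' then x.dropLast else x := by
  rw [PySem.List.pyGet?_neg_one, PySem.List.slice_to_neg_one]
  refine if_congr ?_ rfl rfl
  constructor
  · exact fun h => h.2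
  · intro h
    refine ⟨?_, h⟩
    cases x
    · simp at h
    · simp

theorem stepSixA (x : List Char) (hnd : ND x) :
    (if 16 ≤ x.length then
      (let t := PySem.List.slice x none (some 15)
       if PySem.List.pyGet? t (-1) = some '.' then PySem.List.slice t none (some (-1)) else t)
     else x)
      = if 16 ≤ x.length then rstripDots (x.take 15) else x := by
  refine if_congr Iff.rfl ?_ rfl
  have hs : PySem.List.slice x none (some 15) = x.take 15 := by
    rw [PySem.List.slice_to x (by norm_num : (0:Int) ≤ 15)]
    rfl
  dsimp only
  rw [hs, PySem.List.pyGet?_neg_one, PySem.List.slice_to_neg_one,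
    rstrip_eq (hnd.prefix (List.take_prefix 15 x))]

-- A's emptiness test by length
theorem stepFive (x : List Char) :
    (if x.length ≤ 0 then ['a'] else x) = if x = [] then ['a'] else x := by
  refine if_congr ?_ rfl rfl
  simp [List.length_eq_zero_iff]

-- the two tails of the pipelines agree, as functions of the common value u (needs ND u)
theorem final_eq (u : List Char) (h : ND u) :
    (let a2 := if u.getLast? = some '.' then u.dropLast else u
     let a3 := if a2 = [] then ['a'] else a2
     if 16 ≤ a3.length then rstripDots (a3.take 15) else a3)
      = (let t := u.take 15
         let b2 := if t.getLast? = some '.' then t.dropLast else t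
         if b2 = [] then ['a'] else b2) := by
  dsimp only
  by_cases h15 : u.length ≤ 15
  · rw [List.take_of_length_le h15]
    have hdllen : u.dropLast.length = u.length - 1 := List.length_dropLast
    have hcond : ¬ 16 ≤ (if (if u.getLast? = some '.' then u.dropLast else u) = [] then ['a']
        else (if u.getLast? = some '.' then u.dropLast else u)).length := by
      by_cases hE : (if u.getLast? = some '.' then u.dropLast else u) = []
      · rw [if_pos hE]; decide
      · rw [if_neg hE]
        by_cases hd : u.getLast? = some '.'
        · rw [if_pos hd] at hE ⊢; omega
        · rw [if_neg hd] at hE ⊢; omega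
    rw [if_neg hcond]
  · rw [not_le] at h15
    have hndt : ND (u.take 15) := h.prefix (List.take_prefix 15 u)
    have hlt : (u.take 15).length = 15 := by rw [List.length_take]; omega
    have hlt15 : (u.take 15).dropLast.length = 14 := by
      have : (u.take 15).dropLast.length = (u.take 15).length - 1 := List.length_dropLast
      omega
    by_cases hd : u.getLast? = some '.'
    · simp only [if_pos hd]
      have hdllen : u.dropLast.length = u.length - 1 := List.length_dropLast
      have hne : u.dropLast ≠ [] := by
        intro he; rw [he] at hdllen; simp at hdllen; omega
      rw [if_neg hne]
      by_cases h16 : u.length = 16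
      · -- truncating exactly removes the popped last char
        have hdt : u.dropLast = u.take 15 := by
          rw [List.dropLast_eq_take, h16]
        rw [if_neg (by rw [hdllen, h16]; omega), hdt]
        have hnotdot : (u.take 15).getLast? ≠ some '.' := by
          rw [← hdt]; exact nd_droplast_last h hd
        rw [if_neg hnotdot, if_neg (by intro he; rw [he] at hlt; simp at hlt)]
      · have h17 : 17 ≤ u.length := by omega
        rw [if_pos (by omega)]
        have htake : u.dropLast.take 15 = u.take 15 := by
          rw [List.dropLast_eq_take, List.take_take]
          congr 1; omega
        rw [htake, rstrip_eq hndt]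
        have hb2 : (if (u.take 15).getLast? = some '.' then (u.take 15).dropLast else u.take 15) ≠ [] := by
          split
          · intro he; rw [he] at hlt15; simp at hlt15
          · intro he; rw [he] at hlt; simp at hlt
        rw [if_neg hb2]
    · simp only [if_neg hd]
      have hne : u ≠ [] := by intro he; rw [he] at h15; simp at h15
      rw [if_neg hne, if_pos (by omega), rstrip_eq hndt]
      have hb2 : (if (u.take 15).getLast? = some '.' then (u.take 15).dropLast else u.take 15) ≠ [] := by
        split
        · intro he; rw [he] at hlt15; simp at hlt15
        · intro he; rw [he] at hlt; simp at hlt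
      rw [if_neg hb2]

-- B's pop guard `out ≠ [] ∧ out[-1] = '.'` is just the getLast? test
theorem pop_guard (l : List Char) :
    (if l ≠ [] ∧ l.getLast? = some '.' then l.dropLast else l)
      = if l.getLast? = some '.' then l.dropLast else l := by
  refine if_congr ?_ rfl rfl
  constructor
  · exact fun h => h.2
  · intro h
    refine ⟨?_, h⟩
    intro he; rw [he] at h; simp at h

-- ===== VERDICT (by name: the statement is the Claim_ definition above) =====
theorem solution_spec : Claim_equal_solution := by
  intro new_id _
  simp only [Spec_solution, solution, solution_alt]
  -- A's first three steps: collapseDots of the filtered lowered list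
  rw [stepTwo, stepThree_foldl, go_eq_collapse]
  rw [if_neg (by simp : ¬ ([] : List Char) = ['.'])]
  simp only [List.nil_append]
  set m := (PySem.Chars.lower new_id.toList).filter keepCharA with hm
  -- A's step 4 (leading) turns it into u := collapseDots (m.dropWhile dot)
  rw [stepFourA, tail_collapse]
  set u := collapseDots (m.dropWhile (· = '.')) with hu
  have hndu : ND u := nd_collapse _
  -- B's loop is take 15 of the same u
  have hB : bLoop [] new_id.toList = u.take 15 := by
    rw [bLoop_eq_take _ [] (by simp)]
    simp only [List.getLast?_nil, List.nil_append]
    rw [emit_eq]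
    simp [bDotOK, hu, hm]
  rw [hB, pop_guard]
  have hnd2 : ND (if u.getLast? = some '.' then u.dropLast else u) := by
    split
    · exact hndu.prefix (List.dropLast_prefix u)
    · exact hndu
  have hnd3 : ND (if (if u.getLast? = some '.' then u.dropLast else u) = [] then ['a']
      else (if u.getLast? = some '.' then u.dropLast else u)) := by
    by_cases hE : (if u.getLast? = some '.' then u.dropLast else u) = []
    · rw [if_pos hE]; exact List.isChain_singleton _
    · rw [if_neg hE]; exact hnd2
  rw [stepFourB, stepFive, stepSixA _ hnd3]
  have := final_eq u hndu
  simp only at this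
  rw [this]
  -- both sides are now pad of the same nonempty list
  set s := (let t := u.take 15
            let b2 := if t.getLast? = some '.' then t.dropLast else t
            if b2 = [] then ['a'] else b2) with hs
  have hne : s ≠ [] := by
    rw [hs]
    dsimp only
    by_cases hE : (if (List.take 15 u).getLast? = some '.'
        then (List.take 15 u).dropLast else List.take 15 u) = []
    · rw [if_pos hE]; simp
    · rw [if_neg hE]; exact hE
  rw [pad_eq _ hne]
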